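-- pv_equiv track=rewrite | github.com/riccardocecere/InRatio | Image2Array.py | horizontalMaxs
-- ===== SOURCE A (Python) =====
-- def horizontalMaxs(a):
-- 	"""
-- 		metodo che data in ingresso un array 'a' riporti in uscita
-- 		le posizioni e i valori dei 2 elementi di 'a' che hanno valore
-- 		massimo tra i massimi locali
-- 	"""
-- 	max1, max2 = 0,0
-- 	posMax1, posMax2 = 0,0
-- 	for i in range(1,len(a)-1):
-- 		if a[i]>a[i+1] and a[i]>a[i-1]:
-- 			if a[i]>max1:
-- 				max1 = a[i]
-- 				posMax1 = i
-- 	for i in range(1,len(a)-1):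
-- 		if a[i]>a[i+1] and a[i]>a[i-1]:
-- 			if a[i]>max2 and a[i]<max1:
-- 				max2 = a[i]
-- 				posMax2 = i
-- 	#print posMax1, posMax2
-- 	#plt.plot(a)
-- 	#plt.plot(posMax1, max1, marker='o')
-- 	#plt.plot(posMax2, max2, marker='o')
-- 	#plt.show()
-- 	return posMax1, max1, posMax2, max2
-- ===== SOURCE B (Python) =====
-- def horizontalMaxs(a):
--     """Single fused pass: track top-two local maxima (positions and values) at once."""
--     max1, max2 = 0, 0
--     posMax1, posMax2 = 0, 0
--     for i in range(1, len(a) - 1):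
--         v = a[i]
--         if v > a[i + 1] and v > a[i - 1]:
--             if v > max1:
--                 if max1 > max2:
--                     max2, posMax2 = max1, posMax1
--                 max1, posMax1 = v, i
--             elif v < max1 and v > max2:
--                 max2, posMax2 = v, i
--     return posMax1, max1, posMax2, max2
-- ===== Notes on version B (the rewrite author's own statement) =====
-- stated objective: faster
-- what changed: Fuses A's two full scans of the array into one single pass that maintains the top-two local maxima (values and first positions) simultaneously, displacing the running max into second place when beaten.
import Mathlib
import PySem

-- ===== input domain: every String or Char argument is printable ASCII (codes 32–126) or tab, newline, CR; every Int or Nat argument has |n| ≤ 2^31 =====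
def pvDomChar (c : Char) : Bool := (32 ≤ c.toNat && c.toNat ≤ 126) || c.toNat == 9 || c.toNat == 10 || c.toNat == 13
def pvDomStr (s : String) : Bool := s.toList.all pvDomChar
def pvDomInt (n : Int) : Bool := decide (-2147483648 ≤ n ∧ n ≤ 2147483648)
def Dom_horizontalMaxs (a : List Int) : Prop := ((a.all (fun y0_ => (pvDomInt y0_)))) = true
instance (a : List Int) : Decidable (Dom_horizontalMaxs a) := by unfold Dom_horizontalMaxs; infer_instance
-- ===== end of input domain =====

-- B fuses A's two scans into one pass that maintains the top-two local maxima simultaneously (objective: faster, one pass instead of two).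

-- ===== PORT A =====
def horizontalMaxs (a : List Int) : Int × Int × Int × Int :=
  let s1 := (PySem.List.pyRange 1 ((a.length : Int) - 1) 1).foldl
    (fun (s : Int × Int) (i : Int) =>
      if PySem.List.pyGetD a i 0 > PySem.List.pyGetD a (i + 1) 0 ∧
         PySem.List.pyGetD a i 0 > PySem.List.pyGetD a (i - 1) 0 then
        if PySem.List.pyGetD a i 0 > s.1 then (PySem.List.pyGetD a i 0, i) else s
      else s) (0, 0)
  let s2 := (PySem.List.pyRange 1 ((a.length : Int) - 1) 1).foldl
    (fun (s : Int × Int) (i : Int) =>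
      if PySem.List.pyGetD a i 0 > PySem.List.pyGetD a (i + 1) 0 ∧
         PySem.List.pyGetD a i 0 > PySem.List.pyGetD a (i - 1) 0 then
        if PySem.List.pyGetD a i 0 > s.1 ∧ PySem.List.pyGetD a i 0 < s1.1 then
          (PySem.List.pyGetD a i 0, i)
        else s
      else s) (0, 0)
  (s1.2, s1.1, s2.2, s2.1)

-- ===== PORT B =====
def horizontalMaxs_alt (a : List Int) : Int × Int × Int × Int :=
  let s := (PySem.List.pyRange 1 ((a.length : Int) - 1) 1).foldl
    (fun (s : (Int × Int) × (Int × Int)) (i : Int) =>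
      let v := PySem.List.pyGetD a i 0
      if v > PySem.List.pyGetD a (i + 1) 0 ∧ v > PySem.List.pyGetD a (i - 1) 0 then
        if v > s.1.1 then ((v, i), if s.1.1 > s.2.1 then s.1 else s.2)
        else if v < s.1.1 ∧ v > s.2.1 then (s.1, (v, i))
        else s
      else s) ((0, 0), (0, 0))
  (s.1.2, s.1.1, s.2.2, s.2.1)

-- ===== PRECONDITION & SPEC =====
def Spec_horizontalMaxs (a : List Int) (out : Int × Int × Int × Int) : Prop := out = horizontalMaxs_alt a
instance (a : List Int) (out : Int × Int × Int × Int) : Decidable (Spec_horizontalMaxs a out) := by unfold Spec_horizontalMaxs; infer_instance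

-- ===== CLAIM (what is proved, stated in full; the proofs are below) =====
def Claim_equal_horizontalMaxs : Prop := ∀ (a : List Int), Dom_horizontalMaxs a → Spec_horizontalMaxs a (horizontalMaxs a)

-- ===== LEMMAS AND PROOFS =====

-- the step of A's first scan, over the list of local-maximum events (i, a[i])
def pvStep1 (s : Int × Int) (e : Int × Int) : Int × Int :=
  if e.2 > s.1 then (e.2, e.1) else s

-- the step of A's second scan, with the fixed threshold T = final max1
def pvStep2 (T : Int) (s : Int × Int) (e : Int × Int) : Int × Int :=
  if e.2 > s.1 ∧ e.2 < T then (e.2, e.1) else s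

-- the step of B's fused scan
def pvStepC (s : (Int × Int) × (Int × Int)) (e : Int × Int) : (Int × Int) × (Int × Int) :=
  if e.2 > s.1.1 then ((e.2, e.1), if s.1.1 > s.2.1 then s.1 else s.2)
  else if e.2 < s.1.1 ∧ e.2 > s.2.1 then (s.1, (e.2, e.1))
  else s

-- the local-maximum events of index list l
def pvEvents (a : List Int) (l : List Int) : List (Int × Int) :=
  l.filterMap (fun i =>
    if PySem.List.pyGetD a i 0 > PySem.List.pyGetD a (i + 1) 0 ∧
       PySem.List.pyGetD a i 0 > PySem.List.pyGetD a (i - 1) 0 then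
      some (i, PySem.List.pyGetD a i 0)
    else none)

lemma pvBridge1 (a : List Int) (l : List Int) (s : Int × Int) :
    l.foldl (fun (s : Int × Int) (i : Int) =>
      if PySem.List.pyGetD a i 0 > PySem.List.pyGetD a (i + 1) 0 ∧
         PySem.List.pyGetD a i 0 > PySem.List.pyGetD a (i - 1) 0 then
        if PySem.List.pyGetD a i 0 > s.1 then (PySem.List.pyGetD a i 0, i) else s
      else s) s = (pvEvents a l).foldl pvStep1 s := by
  induction l generalizing s with
  | nil => rfl
  | cons i t ih =>
      by_cases h : PySem.List.pyGetD a i 0 > PySem.List.pyGetD a (i + 1) 0 ∧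
           PySem.List.pyGetD a i 0 > PySem.List.pyGetD a (i - 1) 0 <;>
        simp [pvEvents, h, pvStep1, ih, List.foldl_cons]

lemma pvBridge2 (a : List Int) (T : Int) (l : List Int) (s : Int × Int) :
    l.foldl (fun (s : Int × Int) (i : Int) =>
      if PySem.List.pyGetD a i 0 > PySem.List.pyGetD a (i + 1) 0 ∧
         PySem.List.pyGetD a i 0 > PySem.List.pyGetD a (i - 1) 0 then
        if PySem.List.pyGetD a i 0 > s.1 ∧ PySem.List.pyGetD a i 0 < T then
          (PySem.List.pyGetD a i 0, i)
        else s
      else s) s = (pvEvents a l).foldl (pvStep2 T) s := by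
  induction l generalizing s with
  | nil => rfl
  | cons i t ih =>
      by_cases h : PySem.List.pyGetD a i 0 > PySem.List.pyGetD a (i + 1) 0 ∧
           PySem.List.pyGetD a i 0 > PySem.List.pyGetD a (i - 1) 0 <;>
        simp [pvEvents, h, pvStep2, ih, List.foldl_cons]

lemma pvBridgeC (a : List Int) (l : List Int) (s : (Int × Int) × (Int × Int)) :
    l.foldl (fun (s : (Int × Int) × (Int × Int)) (i : Int) =>
      let v := PySem.List.pyGetD a i 0
      if v > PySem.List.pyGetD a (i + 1) 0 ∧ v > PySem.List.pyGetD a (i - 1) 0 then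
        if v > s.1.1 then ((v, i), if s.1.1 > s.2.1 then s.1 else s.2)
        else if v < s.1.1 ∧ v > s.2.1 then (s.1, (v, i))
        else s
      else s) s = (pvEvents a l).foldl pvStepC s := by
  induction l generalizing s with
  | nil => rfl
  | cons i t ih =>
      by_cases h : PySem.List.pyGetD a i 0 > PySem.List.pyGetD a (i + 1) 0 ∧
           PySem.List.pyGetD a i 0 > PySem.List.pyGetD a (i - 1) 0 <;>
        simp [pvEvents, h, pvStepC, ih, List.foldl_cons]

-- the running max of scan 1 only grows
lemma pvMono1 (ps : List (Int × Int)) (s : Int × Int) :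
    s.1 ≤ (ps.foldl pvStep1 s).1 := by
  induction ps generalizing s with
  | nil => exact le_refl _
  | cons e t ih =>
      refine le_trans ?_ (ih (pvStep1 s e))
      unfold pvStep1; split_ifs with h
      · exact le_of_lt h
      · exact le_refl _

-- every event value is bounded by the final max of scan 1
lemma pvBound1 (e : Int × Int) :
    ∀ (ps : List (Int × Int)) (s : Int × Int), e ∈ ps → e.2 ≤ (ps.foldl pvStep1 s).1 := by
  intro ps
  induction ps with
  | nil => intro s he; cases he
  | cons y t ih =>
      intro s he
      rcases List.mem_cons.1 he with h | h
      · subst h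
        refine le_trans ?_ (pvMono1 t (pvStep1 s e))
        unfold pvStep1; split_ifs with h
        · exact le_refl _
        · omega
      · exact ih _ h

-- with a threshold above every event value, scan 2 behaves exactly like scan 1
lemma pvStep2_eq_step1 (T : Int) :
    ∀ (ps : List (Int × Int)) (s : Int × Int), (∀ e ∈ ps, e.2 < T) →
      ps.foldl (pvStep2 T) s = ps.foldl pvStep1 s := by
  intro ps
  induction ps with
  | nil => intro s _; rfl
  | cons e t ih =>
      intro s h
      have he := h e (List.mem_cons_self)
      have h2 : pvStep2 T s e = pvStep1 s e := by
        unfold pvStep2 pvStep1; split_ifs with h1 h3 <;> first | rfl | omega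
      simp only [List.foldl_cons, h2]
      exact ih _ (fun e' he' => h e' (List.mem_cons_of_mem _ he'))

-- MAIN: the fused scan equals (scan 1, scan 2 with the final max as threshold), plus the invariant
lemma pvMain (ps : List (Int × Int)) :
    ps.foldl pvStepC ((0, 0), (0, 0)) =
      (ps.foldl pvStep1 ((0 : Int), (0 : Int)),
       ps.foldl (pvStep2 (ps.foldl pvStep1 ((0 : Int), (0 : Int))).1) ((0 : Int), (0 : Int))) ∧
    0 ≤ (ps.foldl pvStep1 ((0 : Int), (0 : Int))).1 ∧
    0 ≤ (ps.foldl (pvStep2 (ps.foldl pvStep1 ((0 : Int), (0 : Int))).1) ((0 : Int), (0 : Int))).1 ∧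
    ((ps.foldl (pvStep2 (ps.foldl pvStep1 ((0 : Int), (0 : Int))).1) ((0 : Int), (0 : Int))).1 <
       (ps.foldl pvStep1 ((0 : Int), (0 : Int))).1 ∨
     (ps.foldl pvStep1 ((0 : Int), (0 : Int)) = ((0 : Int), (0 : Int)) ∧
      ps.foldl (pvStep2 (ps.foldl pvStep1 ((0 : Int), (0 : Int))).1) ((0 : Int), (0 : Int)) = ((0 : Int), (0 : Int)))) := by
  induction ps using List.reverseRecOn with
  | nil => exact ⟨rfl, le_refl 0, le_refl 0, Or.inr ⟨rfl, rfl⟩⟩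
  | append_singleton t x ih =>
      obtain ⟨hC, hM, hM2, hinv⟩ := ih
      have hbound : ∀ e ∈ t, e.2 ≤ (t.foldl pvStep1 ((0 : Int), (0 : Int))).1 :=
        fun e he => pvBound1 e t _ he
      simp only [List.foldl_append, List.foldl_cons, List.foldl_nil, hC]
      generalize hg1 : List.foldl pvStep1 ((0 : Int), (0 : Int)) t = r1 at hM hM2 hinv hbound ⊢
      generalize hg2 : List.foldl (pvStep2 r1.1) ((0 : Int), (0 : Int)) t = r2 at hM2 hinv ⊢
      by_cases hgt : x.2 > r1.1
      · -- new overall maximum: the old max is displaced into slot 2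
        have h1 : pvStep1 r1 x = (x.2, x.1) := by unfold pvStep1; simp [hgt]
        rw [h1]
        have h2 : List.foldl (pvStep2 (x.2, x.1).1) ((0 : Int), (0 : Int)) t = r1 := by
          rw [show ((x.2, x.1) : Int × Int).1 = x.2 from rfl]
          rw [pvStep2_eq_step1 x.2 t _ (fun e he => lt_of_le_of_lt (hbound e he) hgt), hg1]
        rw [h2]
        have h3 : pvStep2 (x.2, x.1).1 r1 x = r1 := by unfold pvStep2; simp
        rw [h3]
        have hslot : pvStepC (r1, r2) x = ((x.2, x.1), r1) := by
          unfold pvStepC; rw [if_pos hgt]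
          rcases hinv with h | ⟨ha, hb⟩
          · rw [if_pos h]
          · rw [ha, hb]; simp
        exact ⟨hslot, by omega, hM, Or.inl hgt⟩
      · -- no new maximum: both sides apply the same slot-2 update
        have h1 : pvStep1 r1 x = r1 := by unfold pvStep1; simp [hgt]
        rw [h1, hg2]
        by_cases hupd : x.2 > r2.1 ∧ x.2 < r1.1
        · have h2 : pvStep2 r1.1 r2 x = (x.2, x.1) := by
            unfold pvStep2; rw [if_pos hupd]
          have hslot : pvStepC (r1, r2) x = (r1, (x.2, x.1)) := by
            unfold pvStepC; rw [if_neg hgt, if_pos ⟨hupd.2, hupd.1⟩]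
          exact ⟨by rw [hslot, h2], hM, by rw [h2]; omega, by rw [h2]; exact Or.inl hupd.2⟩
        · have h2 : pvStep2 r1.1 r2 x = r2 := by
            unfold pvStep2; rw [if_neg hupd]
          have hslot : pvStepC (r1, r2) x = (r1, r2) := by
            unfold pvStepC
            rw [if_neg hgt, if_neg (fun hc => hupd ⟨hc.2, hc.1⟩)]
          exact ⟨by rw [hslot, h2], hM, by rw [h2]; exact hM2, by rw [h2]; exact hinv⟩

-- ===== VERDICT (by name: the statement is the Claim_ definition above) =====
theorem horizontalMaxs_spec : Claim_equal_horizontalMaxs := by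
  intro a _
  unfold Spec_horizontalMaxs horizontalMaxs horizontalMaxs_alt
  simp only [pvBridge1, pvBridge2, pvBridgeC]
  obtain ⟨hC, -, -, -⟩ :=
    pvMain (pvEvents a (PySem.List.pyRange 1 ((a.length : Int) - 1) 1))
  rw [hC]
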